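-- pv_equiv track=rewrite | github.com/SurgicalSteel/Competitive-Programming | Kattis-Solutions/Ordinals.py | init_arr
-- ===== SOURCE A (Python) =====
-- def init_arr(max_num):
--     arr = ["{}","{{}}"]
--     i =2
--     while i <= max_num:
--         temp = "{"
--         for x in range(i):
--             temp += arr[x]
--             if x <i-1:
--                 temp += ","
--             else:
--                 temp += "}"
--         arr.append(temp)
--         i += 1
--
--     return arr
-- ===== SOURCE B (Python) =====
-- def init_arr(max_num):
--     arr = ["{}", "{{}}"]
--     inner = "{}"  # comma-joined list of all elements before the last one
--     for i in range(2, max_num + 1):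
--         inner = inner + "," + arr[-1]
--         arr.append("{" + inner + "}")
--     return arr
-- ===== Notes on version B (the rewrite author's own statement) =====
-- stated objective: simpler
-- what changed: B drops A's inner loop that rescans and re-concatenates every prior element: it maintains a running comma-joined accumulator of all earlier elements and builds each new set string from that accumulator and the last element in one plain loop body.
import Mathlib
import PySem

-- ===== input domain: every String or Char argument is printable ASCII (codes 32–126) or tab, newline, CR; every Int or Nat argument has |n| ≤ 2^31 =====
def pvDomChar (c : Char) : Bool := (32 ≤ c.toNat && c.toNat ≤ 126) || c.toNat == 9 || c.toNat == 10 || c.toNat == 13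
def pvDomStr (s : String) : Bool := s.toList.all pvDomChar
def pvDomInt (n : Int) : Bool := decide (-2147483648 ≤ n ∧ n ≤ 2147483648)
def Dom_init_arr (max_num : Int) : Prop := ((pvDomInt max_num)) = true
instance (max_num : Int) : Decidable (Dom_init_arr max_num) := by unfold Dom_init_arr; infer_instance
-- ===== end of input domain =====

-- B replaces A's inner rescan of all prior elements by a running comma-joined
-- accumulator (objective: simpler — one plain loop body, no inner loop).

-- ===== PORT A =====
-- inner for-loop of A: temp = "{"; for x in range(i): temp += arr[x]; temp += "," or "}".
-- arr[x] is always in range on reachable states (len(arr) = i), so pyGetD is exact here.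
def init_arr_inner (arr : List String) (i : Int) : String :=
  (PySem.List.pyRange 0 i 1).foldl
    (fun temp x =>
      let temp := temp ++ PySem.List.pyGetD arr x ""
      if x < i - 1 then temp ++ "," else temp ++ "}")
    "{"

-- the while-loop of A, recursion on the remaining count max_num + 1 - i
def init_arr_loop (arr : List String) (i max_num : Int) : List String :=
  if _h : i ≤ max_num then
    init_arr_loop (arr ++ [init_arr_inner arr i]) (i + 1) max_num
  else arr
termination_by (max_num + 1 - i).toNat
decreasing_by omega

def init_arr (max_num : Int) : List String := init_arr_loop ["{}", "{{}}"] 2 max_num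

-- ===== PORT B =====
-- state = (arr, inner); for i in range(2, max_num+1): inner += "," + arr[-1]; arr.append("{"+inner+"}")
def init_arr_alt (max_num : Int) : List String :=
  ((PySem.List.pyRange 2 (max_num + 1) 1).foldl
    (fun (st : List String × String) _ =>
      let inner := st.2 ++ "," ++ PySem.List.pyGetD st.1 (-1) ""
      (st.1 ++ ["{" ++ inner ++ "}"], inner))
    (["{}", "{{}}"], "{}")).1

-- ===== PRECONDITION & SPEC =====
def Spec_init_arr (max_num : Int) (out : List String) : Prop := out = init_arr_alt max_num
instance (max_num : Int) (out : List String) : Decidable (Spec_init_arr max_num out) := by unfold Spec_init_arr; infer_instance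

-- ===== CLAIM (what is proved, stated in full; the proofs are below) =====
def Claim_equal_init_arr : Prop := ∀ (max_num : Int), Dom_init_arr max_num → Spec_init_arr max_num (init_arr max_num)

-- ===== LEMMAS AND PROOFS =====

-- comma-terminated concatenation of a list of strings
def commaCat (ys : List String) : String := ys.foldl (fun t s => t ++ s ++ ",") ""

theorem foldl_commaCat (ys : List String) (t : String) :
    ys.foldl (fun a v => a ++ v ++ ",") t = t ++ commaCat ys := by
  induction ys generalizing t with
  | nil => simp [commaCat]
  | cons y ys ih =>
      simp only [List.foldl_cons, commaCat] at *
      rw [ih, ih ("" ++ y ++ ",")]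
      simp [String.append_assoc]

theorem commaCat_append_singleton (ys : List String) (s : String) :
    commaCat (ys ++ [s]) = commaCat ys ++ s ++ "," := by
  simp only [commaCat, List.foldl_append, List.foldl_cons, List.foldl_nil]

-- A's inner loop builds "{" ++ (all earlier elements comma-separated) ++ last ++ "}"
theorem init_arr_inner_eq (ys : List String) (s : String) :
    init_arr_inner (ys ++ [s]) ((ys.length : Int) + 1) =
      "{" ++ commaCat ys ++ (s ++ "}") := by
  unfold init_arr_inner
  rw [PySem.List.pyRange_one_succ_right (by positivity)]
  rw [List.foldl_append]
  have hpre :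
      (PySem.List.pyRange 0 (ys.length : Int) 1).foldl
        (fun temp x =>
          let temp := temp ++ PySem.List.pyGetD (ys ++ [s]) x ""
          if x < (ys.length : Int) + 1 - 1 then temp ++ "," else temp ++ "}") "{"
      = "{" ++ commaCat ys := by
    have hcongr := PySem.List.foldl_congr_mem (l := PySem.List.pyRange 0 (ys.length : Int) 1)
      (f := fun temp x =>
          let temp := temp ++ PySem.List.pyGetD (ys ++ [s]) x ""
          if x < (ys.length : Int) + 1 - 1 then temp ++ "," else temp ++ "}")
      (g := fun temp x => temp ++ PySem.List.pyGetD ys x "" ++ ",") (init := "{")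
      (by
        intro a x hx
        rw [PySem.List.mem_pyRange_one] at hx
        have hlt : x < (ys.length : Int) + 1 - 1 := by omega
        simp only [hlt, if_pos]
        rw [PySem.List.pyGetD_eq_getElem (xs := ys ++ [s]) (d := "") hx.1 (by simp; omega),
            PySem.List.pyGetD_eq_getElem (xs := ys) (d := "") hx.1 (by omega)]
        rw [List.getElem_append_left (by omega)])
    rw [hcongr]
    rw [PySem.List.foldl_pyRange_zero_pyGetD' ys "" (fun t v => t ++ v ++ ",") "{"]
    exact foldl_commaCat ys "{"
  rw [hpre]
  simp only [List.foldl_cons, List.foldl_nil]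
  have hno : ¬ ((ys.length : Int) < (ys.length : Int) + 1 - 1) := by omega
  simp only [hno, if_false]
  rw [PySem.List.pyGetD_eq_getElem (xs := ys ++ [s]) (d := "") (by positivity) (by simp)]
  simp [String.append_assoc]

-- B's one fold step, named so the main induction can talk about it
def altStep (st : List String × String) (_x : Int) : List String × String :=
  let inner := st.2 ++ "," ++ PySem.List.pyGetD st.1 (-1) ""
  (st.1 ++ ["{" ++ inner ++ "}"], inner)

-- main loop correspondence: A's while-loop equals B's fold, given the accumulator invariant
theorem loop_eq (n : Nat) : ∀ (i max_num : Int) (ys : List String) (s inner : String),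
    (max_num + 1 - i).toNat = n →
    i = (ys.length : Int) + 1 →
    inner ++ "," = commaCat ys →
    init_arr_loop (ys ++ [s]) i max_num =
      ((PySem.List.pyRange i (max_num + 1) 1).foldl altStep (ys ++ [s], inner)).1 := by
  induction n with
  | zero =>
      intro i max_num ys s inner hn hi hinv
      rw [init_arr_loop]
      rw [dif_neg (by omega), PySem.List.pyRange_one_eq_nil (by omega), List.foldl_nil]
  | succ m ih =>
      intro i max_num ys s inner hn hi hinv
      rw [init_arr_loop]
      by_cases h : i ≤ max_num
      · rw [dif_pos h, PySem.List.pyRange_one_cons (by omega), List.foldl_cons]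
        have hstep : altStep (ys ++ [s], inner) i =
            (ys ++ [s] ++ [init_arr_inner (ys ++ [s]) i], inner ++ "," ++ s) := by
          simp only [altStep, PySem.List.pyGetD_neg_one_append_singleton]
          rw [hi, init_arr_inner_eq]
          have : inner ++ "," ++ s = commaCat ys ++ s := by rw [← hinv]
          rw [this]
          simp [String.append_assoc]
        rw [hstep]
        have := ih (i + 1) max_num (ys ++ [s]) (init_arr_inner (ys ++ [s]) i)
          (inner ++ "," ++ s) (by omega) (by simp [hi])
          (by rw [commaCat_append_singleton, ← hinv])
        rw [hi] at this ⊢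
        rw [init_arr_inner_eq] at this ⊢
        exact this
      · rw [dif_neg h, PySem.List.pyRange_one_eq_nil (by omega), List.foldl_nil]

-- ===== VERDICT (by name: the statement is the Claim_ definition above) =====
theorem init_arr_spec : Claim_equal_init_arr := by
  intro max_num _
  unfold Spec_init_arr init_arr init_arr_alt
  have h := loop_eq (max_num + 1 - 2).toNat 2 max_num ["{}"] "{{}}" "{}"
    rfl (by norm_num) (by decide)
  simpa [altStep] using h
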